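-- pv_equiv track=rewrite | github.com/wzygxr/shuati | class064_MatrixFastPowerAlgorithms/Code19_HDU1575_TrA.py | solve
-- ===== SOURCE A (Python) =====
-- MOD = 9973
--
-- def matrix_multiply(a, b, n):
--     """
--     矩阵乘法
--     时间复杂度: O(n^3)
--     空间复杂度: O(n^2)
--     """
--     res = [[0] * n for _ in range(n)]
--     for i in range(n):
--         for j in range(n):
--             total = 0
--             for c in range(n):
--                 total = (total + a[i][c] * b[c][j]) % MOD
--             res[i][j] = total
--     return res
--
-- def identity_matrix(n):
--     """
--     构造单位矩阵
--     时间复杂度: O(n^2)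
--     空间复杂度: O(n^2)
--     """
--     res = [[0] * n for _ in range(n)]
--     for i in range(n):
--         res[i][i] = 1
--     return res
--
-- def matrix_power(base, exp, n):
--     """
--     矩阵快速幂
--     时间复杂度: O(n^3 * logk)
--     空间复杂度: O(n^2)
--     """
--     res = identity_matrix(n)
--     temp = base
--     temp_exp = exp
--
--     while temp_exp > 0:
--         if temp_exp & 1:
--             res = matrix_multiply(res, temp, n)
--         temp = matrix_multiply(temp, temp, n)
--         temp_exp >>= 1
--
--     return res
--
-- def solve(A, n, k):
--     """
--     计算A^k的迹mod 9973
--     时间复杂度: O(n^3 * logk)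
--     空间复杂度: O(n^2)
--
--     算法思路:
--     1. 使用矩阵快速幂计算A^k
--     2. 计算结果矩阵的迹（主对角线元素之和）
--     3. 对结果取模
--     """
--     # 特殊情况处理: k=0时，A^0是单位矩阵，迹为n
--     if k == 0:
--         return n % MOD
--
--     # 计算A^k
--     result = matrix_power(A, k, n)
--
--     # 计算迹
--     trace = 0
--     for i in range(n):
--         trace = (trace + result[i][i]) % MOD
--
--     return trace
-- ===== SOURCE B (Python) =====
-- MOD = 9973
--
-- def _mat_mul(a, b, n):
--     return [[sum(a[i][c] * b[c][j] for c in range(n)) % MOD for j in range(n)]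
--             for i in range(n)]
--
-- def _identity(n):
--     return [[1 if i == j else 0 for j in range(n)] for i in range(n)]
--
-- def _mat_pow(base, exp, n):
--     # recursive divide-and-conquer exponentiation
--     if exp <= 0:
--         return _identity(n)
--     half = _mat_pow(base, exp // 2, n)
--     sq = _mat_mul(half, half, n)
--     if exp % 2 == 1:
--         return _mat_mul(sq, base, n)
--     return sq
--
-- def solve(A, n, k):
--     if k == 0:
--         return n % MOD
--     result = _mat_pow(A, k, n)
--     return sum(result[i][i] for i in range(n)) % MOD
-- ===== Notes on version B (the rewrite author's own statement) =====
-- stated objective: alternative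
-- what changed: Replaces the iterative bit-scanning while-loop exponentiation (accumulator times running square) by a recursive divide-and-conquer squaring (power(exp//2) squared, times base when odd), and sums each dot product / the trace before a single mod instead of reducing at every step.
import Mathlib
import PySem

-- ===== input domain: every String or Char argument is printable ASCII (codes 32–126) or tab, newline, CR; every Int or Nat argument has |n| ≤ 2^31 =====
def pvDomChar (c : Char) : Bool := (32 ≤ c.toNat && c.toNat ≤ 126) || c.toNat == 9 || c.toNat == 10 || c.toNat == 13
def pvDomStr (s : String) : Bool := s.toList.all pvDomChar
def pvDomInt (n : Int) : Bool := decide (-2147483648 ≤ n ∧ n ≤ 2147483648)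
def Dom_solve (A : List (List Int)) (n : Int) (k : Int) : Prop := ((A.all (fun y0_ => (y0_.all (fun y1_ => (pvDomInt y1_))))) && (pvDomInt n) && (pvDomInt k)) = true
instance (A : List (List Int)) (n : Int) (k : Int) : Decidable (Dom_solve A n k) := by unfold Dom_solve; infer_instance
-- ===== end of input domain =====

-- B replaces A's iterative bit-loop exponentiation by recursive divide-and-conquer squaring
-- (and sums before reducing mod); a different decomposition of the same trace-of-A^k computation.

-- ===== PORT A =====
-- a[i][c] etc. is ported as a total getD-0 lookup; Pre_solve keeps exactly the inputs where
-- every index Python dereferences is in range (outside, Python raises IndexError).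
def getE (X : List (List Int)) (i j : Nat) : Int := (X.getD i []).getD j 0

-- matrix_multiply: res[i][j] = fold of total = (total + a[i][c]*b[c][j]) % MOD over c in range(n)
-- (% with the positive literal 9973 is Int.emod = Python %; range(n) over an Int n is List.range n.toNat)
def matMul (a b : List (List Int)) (n : Int) : List (List Int) :=
  (List.range n.toNat).map fun i => (List.range n.toNat).map fun j =>
    (List.range n.toNat).foldl (fun total c => (total + getE a i c * getE b c j) % 9973) 0

-- identity_matrix: zeros with res[i][i] = 1
def identM (n : Int) : List (List Int) :=
  (List.range n.toNat).map fun i => (List.range n.toNat).map fun j => if j = i then 1 else 0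

-- matrix_power's while-loop: temp_exp & 1 is PySem.Int.band (truthy ↔ ≠ 0); temp_exp >>= 1 is >>>
def powLoop (res temp : List (List Int)) (e n : Int) : List (List Int) :=
  if _h : 0 < e then
    powLoop (if PySem.Int.band e 1 ≠ 0 then matMul res temp n else res)
      (matMul temp temp n) (e >>> (1 : Nat)) n
  else res
termination_by e.toNat
decreasing_by
  have h2 : e >>> (1 : Nat) = e / 2 := by simp [Int.shiftRight_eq_div_pow]
  rw [h2]; omega

def matPow (base : List (List Int)) (exp n : Int) : List (List Int) :=
  powLoop (identM n) base exp n

def solve (A : List (List Int)) (n : Int) (k : Int) : Int :=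
  if k = 0 then PySem.Int.mod n 9973
  else
    let result := matPow A k n
    (List.range n.toNat).foldl (fun trace i => (trace + getE result i i) % 9973) 0

-- ===== PORT B =====
-- _mat_mul: sum over c first, one % MOD at the end
def matMulB (a b : List (List Int)) (n : Int) : List (List Int) :=
  (List.range n.toNat).map fun i => (List.range n.toNat).map fun j =>
    ((List.range n.toNat).foldl (fun t c => t + getE a i c * getE b c j) 0) % 9973

def identB (n : Int) : List (List Int) :=
  (List.range n.toNat).map fun i => (List.range n.toNat).map fun j => if i = j then 1 else 0

-- _mat_pow: recursive divide-and-conquer squaring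
def recPow (base : List (List Int)) (exp n : Int) : List (List Int) :=
  if _h : exp ≤ 0 then identB n
  else
    let half := recPow base (PySem.Int.floordiv exp 2) n
    let sq := matMulB half half n
    if PySem.Int.mod exp 2 = 1 then matMulB sq base n else sq
termination_by exp.toNat
decreasing_by
  have h2 : PySem.Int.floordiv exp 2 = exp / 2 := PySem.Int.floordiv_eq_ediv_of_pos (by omega)
  rw [h2]; omega

def solve_alt (A : List (List Int)) (n : Int) (k : Int) : Int :=
  if k = 0 then PySem.Int.mod n 9973
  else
    let result := recPow A k n
    (((List.range n.toNat).map fun i => getE result i i).sum) % 9973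

-- ===== PRECONDITION & SPEC =====
-- Pre_solve excludes exactly the inputs on which Python A raises IndexError: k > 0 and n > 0 with
-- fewer than n rows, or one of the first n rows shorter than n (matrix_multiply reads A[i][c] for i,c < n).
def Pre_solve (A : List (List Int)) (n : Int) (k : Int) : Prop :=
  0 < k → 0 < n → n ≤ (A.length : Int) ∧ ∀ row ∈ A.take n.toNat, n ≤ (row.length : Int)
instance (A : List (List Int)) (n : Int) (k : Int) : Decidable (Pre_solve A n k) := by
  unfold Pre_solve; infer_instance

def pvWitness_solve : List (List Int) × Int × Int := ([[1, 2], [3, 4]], 2, 3)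

def Spec_solve (A : List (List Int)) (n : Int) (k : Int) (out : Int) : Prop := out = solve_alt A n k
instance (A : List (List Int)) (n : Int) (k : Int) (out : Int) : Decidable (Spec_solve A n k out) := by
  unfold Spec_solve; infer_instance

-- ===== CLAIM (what is proved, stated in full; the proofs are below) =====
def Claim_equal_solve : Prop := ∀ (A : List (List Int)) (n : Int) (k : Int), Dom_solve A n k → Pre_solve A n k → Spec_solve A n k (solve A n k)

-- ===== LEMMAS AND PROOFS =====

-- entries are in [0, 9973) and the matrix is m × m
def GoodM (m : Nat) (X : List (List Int)) : Prop :=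
  X.length = m ∧ ∀ row ∈ X, row.length = m ∧ ∀ x ∈ row, 0 ≤ x ∧ x < 9973

-- abstraction into the matrix ring over ZMod 9973
def phiM (m : Nat) (X : List (List Int)) : Matrix (Fin m) (Fin m) (ZMod 9973) :=
  Matrix.of fun i j => ((getE X i.val j.val : Int) : ZMod 9973)

theorem getE_mk (m : Nat) (f : Nat → Nat → Int) (i j : Nat) (hi : i < m) (hj : j < m) :
    getE ((List.range m).map fun i => (List.range m).map fun j => f i j) i j = f i j := by
  simp [getE, List.getD_eq_getElem?_getD, hi, hj]

theorem foldl_mod_eq (l : List Nat) (g : Nat → Int) (t : Int) (hl : l ≠ []) :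
    l.foldl (fun t c => (t + g c) % 9973) t = (t + (l.map g).sum) % 9973 := by
  induction l generalizing t with
  | nil => cases hl rfl
  | cons c cs ih =>
    cases cs with
    | nil => simp
    | cons d ds =>
      rw [List.foldl_cons, ih _ (by simp)]
      simp only [List.map_cons, List.sum_cons]
      omega

theorem mul_eq (a b : List (List Int)) (n : Int) : matMul a b n = matMulB a b n := by
  unfold matMul matMulB
  apply List.map_congr_left; intro i hi
  apply List.map_congr_left; intro j hj
  have hm : (List.range n.toNat) ≠ [] := by
    intro h; rw [h] at hi; exact (List.not_mem_nil hi)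
  rw [foldl_mod_eq _ _ _ hm, PySem.List.foldl_add]

theorem ident_eq (n : Int) : identM n = identB n := by
  unfold identM identB
  apply List.map_congr_left; intro i _
  apply List.map_congr_left; intro j _
  by_cases h : i = j <;> simp [h, Ne.symm]

theorem good_mulB (a b : List (List Int)) (n : Int) : GoodM n.toNat (matMulB a b n) := by
  refine ⟨by simp [matMulB], ?_⟩
  intro row hrow
  simp only [matMulB, List.mem_map, List.mem_range] at hrow
  obtain ⟨i, _, rfl⟩ := hrow
  refine ⟨by simp, ?_⟩
  intro x hx
  simp only [List.mem_map, List.mem_range] at hx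
  obtain ⟨j, _, rfl⟩ := hx
  exact ⟨Int.emod_nonneg _ (by norm_num), Int.emod_lt_of_pos _ (by norm_num)⟩

theorem good_identB (n : Int) : GoodM n.toNat (identB n) := by
  refine ⟨by simp [identB], ?_⟩
  intro row hrow
  simp only [identB, List.mem_map, List.mem_range] at hrow
  obtain ⟨i, _, rfl⟩ := hrow
  refine ⟨by simp, ?_⟩
  intro x hx
  simp only [List.mem_map, List.mem_range] at hx
  obtain ⟨j, _, rfl⟩ := hx
  by_cases h : i = j <;> simp [h]

theorem cast_sum (l : List Int) :
    ((l.sum : Int) : ZMod 9973) = (l.map (fun x => (Int.cast x : ZMod 9973))).sum := by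
  induction l with
  | nil => simp
  | cons x xs ih => simp [ih]

theorem sum_range_eq (m : Nat) (f : Nat → ZMod 9973) :
    ((List.range m).map f).sum = ∑ i ∈ Finset.range m, f i := by
  induction m with
  | zero => simp
  | succ m ih => rw [List.range_succ, Finset.sum_range_succ, List.map_append]; simp [ih]

theorem castMod (a : Int) : ((a % 9973 : Int) : ZMod 9973) = (a : ZMod 9973) :=
  ZMod.intCast_mod a 9973

theorem phi_mulB (a b : List (List Int)) (n : Int) :
    phiM n.toNat (matMulB a b n) = phiM n.toNat a * phiM n.toNat b := by
  ext i j
  have hE := getE_mk n.toNat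
    (fun i j => ((List.range n.toNat).foldl (fun t c => t + getE a i c * getE b c j) 0) % 9973)
    i.val j.val i.isLt j.isLt
  show ((getE (matMulB a b n) i.val j.val : Int) : ZMod 9973) = _
  rw [show getE (matMulB a b n) i.val j.val =
      ((List.range n.toNat).foldl (fun t c => t + getE a i.val c * getE b c j.val) 0) % 9973
    from hE]
  rw [castMod, PySem.List.foldl_add, zero_add, cast_sum, List.map_map, Matrix.mul_apply]
  rw [show ((fun x => (Int.cast x : ZMod 9973)) ∘ fun c => getE a i.val c * getE b c j.val)
      = fun c => ((getE a i.val c : Int) : ZMod 9973) * ((getE b c j.val : Int) : ZMod 9973) by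
    funext c; simp only [Function.comp_apply]; push_cast; rfl]
  rw [sum_range_eq, ← Fin.sum_univ_eq_sum_range (fun c => ((getE a i.val c : Int) : ZMod 9973) * ((getE b c j.val : Int) : ZMod 9973))]
  simp [phiM]

theorem phi_identB (n : Int) : phiM n.toNat (identB n) = 1 := by
  ext i j
  show ((getE (identB n) i.val j.val : Int) : ZMod 9973) = _
  rw [show getE (identB n) i.val j.val = if i.val = j.val then 1 else 0 from
    getE_mk n.toNat (fun i j => if i = j then 1 else 0) i.val j.val i.isLt j.isLt]
  rw [Matrix.one_apply]
  by_cases h : i = j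
  · simp [h]
  · rw [if_neg h, if_neg (fun hv => h (Fin.ext hv))]; simp

theorem good_powLoop (res temp : List (List Int)) (e n : Int) (hres : GoodM n.toNat res) :
    GoodM n.toNat (powLoop res temp e n) := by
  induction hN : e.toNat using Nat.strong_induction_on generalizing e res temp with
  | _ N ih =>
  by_cases h : 0 < e
  · rw [powLoop, dif_pos h]
    have h2 : e >>> (1 : Nat) = e / 2 := by simp [Int.shiftRight_eq_div_pow]
    have hres' : GoodM n.toNat (if PySem.Int.band e 1 ≠ 0 then matMul res temp n else res) := by
      by_cases hb : PySem.Int.band e 1 ≠ 0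
      · rw [if_pos hb, mul_eq]; exact good_mulB _ _ _
      · rw [if_neg hb]; exact hres
    rw [h2]
    exact ih (e / 2).toNat (by omega) _ (matMul temp temp n) (e / 2) hres' rfl
  · rw [powLoop, dif_neg h]; exact hres

theorem good_recPow (base : List (List Int)) (e n : Int) : GoodM n.toNat (recPow base e n) := by
  induction hN : e.toNat using Nat.strong_induction_on generalizing e with
  | _ N ih =>
  by_cases h : e ≤ 0
  · rw [recPow, dif_pos h]; exact good_identB n
  · rw [recPow, dif_neg h]
    by_cases ho : PySem.Int.mod e 2 = 1
    · rw [if_pos ho]; exact good_mulB _ _ _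
    · rw [if_neg ho]; exact good_mulB _ _ _

theorem phi_powLoop (res temp : List (List Int)) (e n : Int) :
    phiM n.toNat (powLoop res temp e n) = phiM n.toNat res * (phiM n.toNat temp) ^ e.toNat := by
  induction hN : e.toNat using Nat.strong_induction_on generalizing e res temp with
  | _ N ih =>
  subst hN
  by_cases h : 0 < e
  · rw [powLoop, dif_pos h]
    have h2 : e >>> (1 : Nat) = e / 2 := by simp [Int.shiftRight_eq_div_pow]
    rw [h2, ih (e / 2).toNat (by omega) _ _ _ rfl, mul_eq temp temp n, phi_mulB temp temp n]
    have hband : PySem.Int.band e 1 = e % 2 := by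
      rw [PySem.Int.band_one, PySem.Int.mod_eq_emod_of_pos (by norm_num)]
    by_cases hodd : e % 2 = 1
    · rw [if_pos (by rw [hband, hodd]; norm_num), mul_eq res temp n, phi_mulB res temp n]
      rw [mul_assoc, ← pow_two, ← pow_mul, ← pow_succ',
        show 2 * (e / 2).toNat + 1 = e.toNat from by omega]
    · rw [if_neg (by rw [hband]; omega)]
      rw [← pow_two, ← pow_mul, show 2 * (e / 2).toNat = e.toNat from by omega]
  · rw [powLoop, dif_neg h]
    rw [show e.toNat = 0 from by omega, pow_zero, mul_one]

theorem phi_recPow (base : List (List Int)) (e n : Int) :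
    phiM n.toNat (recPow base e n) = (phiM n.toNat base) ^ e.toNat := by
  induction hN : e.toNat using Nat.strong_induction_on generalizing e with
  | _ N ih =>
  subst hN
  by_cases h : e ≤ 0
  · rw [recPow, dif_pos h, phi_identB]
    rw [show e.toNat = 0 from by omega, pow_zero]
  · rw [recPow, dif_neg h]
    have h2 : PySem.Int.floordiv e 2 = e / 2 := PySem.Int.floordiv_eq_ediv_of_pos (by norm_num)
    have hmod : PySem.Int.mod e 2 = e % 2 := PySem.Int.mod_eq_emod_of_pos (by norm_num)
    by_cases hodd : e % 2 = 1
    · rw [if_pos (by rw [hmod, hodd])]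
      rw [phi_mulB, phi_mulB, h2, ih (e / 2).toNat (by omega) _ rfl]
      rw [← pow_add, ← pow_succ, show (e / 2).toNat + (e / 2).toNat + 1 = e.toNat from by omega]
    · rw [if_neg (by rw [hmod]; exact hodd)]
      rw [phi_mulB, h2, ih (e / 2).toNat (by omega) _ rfl]
      rw [← pow_add, show (e / 2).toNat + (e / 2).toNat = e.toNat from by omega]

theorem getE_eq_getElem (X : List (List Int)) (i j : Nat) (hi : i < X.length)
    (hj : j < X[i].length) : getE X i j = X[i][j] := by
  simp [getE, List.getD_eq_getElem?_getD, hi, hj]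

theorem eq_of_good_phi (m : Nat) (X Y : List (List Int)) (hX : GoodM m X) (hY : GoodM m Y)
    (hphi : phiM m X = phiM m Y) : X = Y := by
  obtain ⟨hXl, hXr⟩ := hX
  obtain ⟨hYl, hYr⟩ := hY
  apply List.ext_getElem (by omega)
  intro i hi hi'
  have hXi := hXr X[i] (List.getElem_mem hi)
  have hYi := hYr Y[i] (List.getElem_mem hi')
  apply List.ext_getElem (by omega)
  intro j hj hj'
  have hx := hXi.2 X[i][j] (List.getElem_mem hj)
  have hy := hYi.2 Y[i][j] (List.getElem_mem hj')
  have him : i < m := by omega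
  have hjm : j < m := by omega
  have hc := congrFun (congrFun hphi ⟨i, him⟩) ⟨j, hjm⟩
  simp only [phiM, Matrix.of_apply] at hc
  rw [getE_eq_getElem X i j (by omega) (by omega),
      getE_eq_getElem Y i j (by omega) (by omega)] at hc
  have h2 : X[i][j] % 9973 = Y[i][j] % 9973 := (ZMod.intCast_eq_intCast_iff _ _ _).mp hc
  omega

theorem pow_eq (base : List (List Int)) (e n : Int) :
    powLoop (identM n) base e n = recPow base e n := by
  apply eq_of_good_phi n.toNat
  · exact good_powLoop _ _ _ _ (ident_eq n ▸ good_identB n)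
  · exact good_recPow _ _ _
  · rw [phi_powLoop, phi_recPow, ident_eq, phi_identB, one_mul]

theorem trace_eq (X : List (List Int)) (m : Nat) :
    (List.range m).foldl (fun t i => (t + getE X i i) % 9973) 0 =
      ((List.range m).map fun i => getE X i i).sum % 9973 := by
  cases m with
  | zero => simp
  | succ m' => rw [foldl_mod_eq _ _ _ (by simp), zero_add]

-- ===== VERDICT (by name: the statement is the Claim_ definition above) =====
theorem solve_spec : Claim_equal_solve := by
  intro A n k _ _
  unfold Spec_solve solve solve_alt matPow
  by_cases hk : k = 0
  · simp [hk]
  · rw [if_neg hk, if_neg hk]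
    simp only []
    rw [pow_eq, trace_eq]
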